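-- pv_equiv track=rewrite | github.com/mohammadfaiizan/ProjectI | DSA/Theory/String/010_string_regex_and_wildcard.py | is_valid_regex
-- ===== SOURCE A (Python) =====
-- def is_valid_regex(pattern: str) -> bool:
--     """Check if regex pattern is valid"""
--     stack = []
--     i = 0
--
--     while i < len(pattern):
--         char = pattern[i]
--
--         if char == '(':
--             stack.append('(')
--         elif char == ')':
--             if not stack or stack[-1] != '(':
--                 return False
--             stack.pop()
--         elif char == '[':
--             stack.append('[')
--         elif char == ']':
--             if not stack or stack[-1] != '[':
--                 return False
--             stack.pop()
--         elif char == '\\':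
--             if i + 1 >= len(pattern):
--                 return False
--             i += 1  # Skip escaped character
--         elif char == '*' or char == '+' or char == '?':
--             if i == 0:
--                 return False
--             prev_char = pattern[i - 1]
--             if prev_char in '*+?':
--                 return False
--
--         i += 1
--
--     return len(stack) == 0
-- ===== SOURCE B (Python) =====
-- def is_valid_regex(pattern: str) -> bool:
--     # Pass 1: tokenize; '\' consumes the next char into an escaped-literal token.
--     tokens = []  # (char, escaped)
--     esc = False
--     for c in pattern:
--         if esc:
--             tokens.append((c, True))
--             esc = False
--         elif c == '\\':
--             esc = True
--         else:
--             tokens.append((c, False))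
--     if esc:
--         return False  # dangling escape
--     # Pass 2: stack of open brackets; quantifier checked against previous token's char.
--     stack = []
--     prev = None
--     for ch, escaped in tokens:
--         if not escaped:
--             if ch == '(' or ch == '[':
--                 stack.append(ch)
--             elif ch == ')':
--                 if not stack or stack[-1] != '(':
--                     return False
--                 stack.pop()
--             elif ch == ']':
--                 if not stack or stack[-1] != '[':
--                     return False
--                 stack.pop()
--             elif ch in '*+?':
--                 if prev is None or prev in '*+?':
--                     return False
--         prev = ch
--     return not stack
-- ===== Notes on version B (the rewrite author's own statement) =====
-- stated objective: alternative
-- what changed: Replaced the single index-driven while loop (manual i skipping for escapes, pattern[i-1] lookback) with a two-pass design: a tokenizer that folds '\'+char into escaped-literal tokens, then a stack/previous-token scan over the token list.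
import Mathlib
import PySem

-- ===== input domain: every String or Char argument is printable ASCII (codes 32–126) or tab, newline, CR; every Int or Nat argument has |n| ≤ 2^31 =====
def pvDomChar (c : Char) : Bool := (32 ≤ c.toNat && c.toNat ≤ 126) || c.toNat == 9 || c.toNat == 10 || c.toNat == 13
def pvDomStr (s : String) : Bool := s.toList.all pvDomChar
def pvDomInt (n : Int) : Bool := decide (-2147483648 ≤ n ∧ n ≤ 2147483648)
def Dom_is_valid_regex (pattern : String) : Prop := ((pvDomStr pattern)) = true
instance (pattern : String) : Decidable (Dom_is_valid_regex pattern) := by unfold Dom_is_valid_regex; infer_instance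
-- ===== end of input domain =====

-- B replaces A's index-driven while loop by a tokenize-then-scan two-pass design (alternative decomposition, same cost).

-- ===== PORT A =====
-- A's while loop over index i; stack kept with its top at the head (append/pop at the same end as Python's list tail).
def isValidRegexLoopA (cs : List Char) (stack : List Char) (i : Nat) : Bool :=
  if h : i < cs.length then
    let c := cs[i]
    if c = '(' then isValidRegexLoopA cs ('(' :: stack) (i + 1)
    else if c = ')' then
      match stack with
      | [] => false                      -- not stack
      | top :: rest =>                   -- stack[-1] != '(' / pop
        if top = '(' then isValidRegexLoopA cs rest (i + 1) else false
    else if c = '[' then isValidRegexLoopA cs ('[' :: stack) (i + 1)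
    else if c = ']' then
      match stack with
      | [] => false
      | top :: rest =>
        if top = '[' then isValidRegexLoopA cs rest (i + 1) else false
    else if c = '\\' then
      if i + 1 ≥ cs.length then false
      else isValidRegexLoopA cs stack (i + 2)   -- i += 1 (skip escaped char) then i += 1
    else if c = '*' ∨ c = '+' ∨ c = '?' then
      if h0 : i = 0 then false
      else
        let prev := cs[i - 1]'(by omega)
        if prev = '*' ∨ prev = '+' ∨ prev = '?' then false   -- prev_char in '*+?'
        else isValidRegexLoopA cs stack (i + 1)
    else isValidRegexLoopA cs stack (i + 1)
  else stack.isEmpty   -- len(stack) == 0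
termination_by cs.length - i

def is_valid_regex (pattern : String) : Bool :=
  isValidRegexLoopA pattern.toList [] 0

-- ===== PORT B =====
-- Pass 1: tokenize; '\' consumes the next char into an escaped-literal token; none = dangling escape.
def isValidRegexTokB : List Char → Bool → Option (List (Char × Bool))
  | [], esc => if esc then none else some []
  | c :: cs, esc =>
    if esc then (isValidRegexTokB cs false).map (fun ts => (c, true) :: ts)
    else if c = '\\' then isValidRegexTokB cs true
    else (isValidRegexTokB cs false).map (fun ts => (c, false) :: ts)

-- Pass 2: stack of open brackets (top at head) and the previous token's char.
def isValidRegexScanB : List (Char × Bool) → List Char → Option Char → Bool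
  | [], stack, _ => stack.isEmpty
  | (c, escaped) :: ts, stack, prev =>
    if escaped then isValidRegexScanB ts stack (some c)
    else if c = '(' ∨ c = '[' then isValidRegexScanB ts (c :: stack) (some c)
    else if c = ')' then
      match stack with
      | [] => false
      | top :: rest =>
        if top = '(' then isValidRegexScanB ts rest (some c) else false
    else if c = ']' then
      match stack with
      | [] => false
      | top :: rest =>
        if top = '[' then isValidRegexScanB ts rest (some c) else false
    else if c = '*' ∨ c = '+' ∨ c = '?' then
      match prev with
      | none => false
      | some p => if p = '*' ∨ p = '+' ∨ p = '?' then false else isValidRegexScanB ts stack (some c)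
    else isValidRegexScanB ts stack (some c)

def is_valid_regex_alt (pattern : String) : Bool :=
  match isValidRegexTokB pattern.toList false with
  | none => false
  | some ts => isValidRegexScanB ts [] none

-- ===== PRECONDITION & SPEC =====
def Spec_is_valid_regex (pattern : String) (out : Bool) : Prop := out = is_valid_regex_alt pattern
instance (pattern : String) (out : Bool) : Decidable (Spec_is_valid_regex pattern out) := by unfold Spec_is_valid_regex; infer_instance

-- ===== CLAIM (what is proved, stated in full; the proofs are below) =====
def Claim_equal_is_valid_regex : Prop := ∀ (pattern : String), Dom_is_valid_regex pattern → Spec_is_valid_regex pattern (is_valid_regex pattern)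

-- ===== LEMMAS AND PROOFS =====

-- previous raw character seen from position i (A's pattern[i-1] view)
def isValidRegexPrevOf : List Char → Nat → Option Char
  | _, 0 => none
  | cs, i + 1 => cs[i]?

-- B's result on the suffix of cs starting at i, with the stack and previous char as A would have them
def isValidRegexSpecAt (cs : List Char) (i : Nat) (stack : List Char) : Bool :=
  match isValidRegexTokB (cs.drop i) false with
  | none => false
  | some ts => isValidRegexScanB ts stack (isValidRegexPrevOf cs i)

lemma isValidRegexTokB_cons (c : Char) (hc : c ≠ '\\') (cs : List Char) :
    isValidRegexTokB (c :: cs) false = (isValidRegexTokB cs false).map (fun ts => (c, false) :: ts) := by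
  simp [isValidRegexTokB, hc]

lemma isValidRegexMatchMap (o : Option (List (Char × Bool))) (t : Char × Bool)
    (st : List Char) (pv : Option Char) :
    (match o.map (fun ts => t :: ts) with
      | none => false
      | some ts => isValidRegexScanB ts st pv) =
    (match o with
      | none => false
      | some ts => isValidRegexScanB (t :: ts) st pv) := by
  cases o <;> rfl

lemma isValidRegexLoopA_eq (cs : List Char) : ∀ (n i : Nat) (stack : List Char),
    cs.length - i = n → i ≤ cs.length →
    isValidRegexLoopA cs stack i = isValidRegexSpecAt cs i stack := by
  intro n
  induction n using Nat.strong_induction_on with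
  | _ n IH =>
    intro i stack hn h
    rw [isValidRegexLoopA.eq_def]
    by_cases hlt : i < cs.length
    · have hdrop : cs.drop i = cs[i] :: cs.drop (i + 1) := List.drop_eq_getElem_cons hlt
      have hprev : isValidRegexPrevOf cs (i + 1) = some cs[i] := by
        simp [isValidRegexPrevOf, List.getElem?_eq_getElem hlt]
      rw [dif_pos hlt]
      simp only []
      by_cases h1 : cs[i] = '('
      · rw [if_pos h1,
          IH (cs.length - (i + 1)) (by omega) (i + 1) ('(' :: stack) rfl (by omega)]
        unfold isValidRegexSpecAt
        rw [hdrop, hprev, h1, isValidRegexTokB_cons _ (by decide), isValidRegexMatchMap]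
        cases isValidRegexTokB (cs.drop (i + 1)) false <;>
          simp [isValidRegexScanB]
      · rw [if_neg h1]
        by_cases h2 : cs[i] = ')'
        · rw [if_pos h2]
          unfold isValidRegexSpecAt
          rw [hdrop, h2, isValidRegexTokB_cons _ (by decide), isValidRegexMatchMap]
          cases stack with
          | nil =>
            cases isValidRegexTokB (cs.drop (i + 1)) false <;> simp [isValidRegexScanB]
          | cons s rest =>
            change (if s = '(' then isValidRegexLoopA cs rest (i + 1) else false) = _
            by_cases hs : s = '('
            · rw [if_pos hs,
                IH (cs.length - (i + 1)) (by omega) (i + 1) rest rfl (by omega)]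
              unfold isValidRegexSpecAt
              rw [hprev]
              cases isValidRegexTokB (cs.drop (i + 1)) false <;> simp [isValidRegexScanB, h2, hs]
            · rw [if_neg hs]
              cases isValidRegexTokB (cs.drop (i + 1)) false <;>
                simp [isValidRegexScanB, hs]
        · rw [if_neg h2]
          by_cases h3 : cs[i] = '['
          · rw [if_pos h3,
              IH (cs.length - (i + 1)) (by omega) (i + 1) ('[' :: stack) rfl (by omega)]
            unfold isValidRegexSpecAt
            rw [hdrop, hprev, h3, isValidRegexTokB_cons _ (by decide), isValidRegexMatchMap]
            cases isValidRegexTokB (cs.drop (i + 1)) false <;>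
              simp [isValidRegexScanB]
          · rw [if_neg h3]
            by_cases h4 : cs[i] = ']'
            · rw [if_pos h4]
              unfold isValidRegexSpecAt
              rw [hdrop, h4, isValidRegexTokB_cons _ (by decide), isValidRegexMatchMap]
              cases stack with
              | nil =>
                cases isValidRegexTokB (cs.drop (i + 1)) false <;> simp [isValidRegexScanB]
              | cons s rest =>
                change (if s = '[' then isValidRegexLoopA cs rest (i + 1) else false) = _
                by_cases hs : s = '['
                · rw [if_pos hs,
                    IH (cs.length - (i + 1)) (by omega) (i + 1) rest rfl (by omega)]
                  unfold isValidRegexSpecAt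
                  rw [hprev]
                  subst hs
                  cases isValidRegexTokB (cs.drop (i + 1)) false <;> simp [isValidRegexScanB, h4]
                · rw [if_neg hs]
                  cases isValidRegexTokB (cs.drop (i + 1)) false <;>
                    simp [isValidRegexScanB, hs]
            · rw [if_neg h4]
              by_cases h5 : cs[i] = '\\'
              · rw [if_pos h5]
                by_cases h6 : i + 1 ≥ cs.length
                · rw [if_pos h6]
                  have : cs.drop (i + 1) = [] := List.drop_of_length_le h6
                  unfold isValidRegexSpecAt
                  rw [hdrop, h5, this]
                  simp [isValidRegexTokB]
                · rw [if_neg h6]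
                  have hlt2 : i + 1 < cs.length := by omega
                  have hdrop2 : cs.drop (i + 1) = cs[i + 1] :: cs.drop (i + 2) :=
                    List.drop_eq_getElem_cons hlt2
                  have hprev2 : isValidRegexPrevOf cs (i + 2) = some cs[i + 1] := by
                    simp [isValidRegexPrevOf, List.getElem?_eq_getElem hlt2]
                  rw [IH (cs.length - (i + 2)) (by omega) (i + 2) stack rfl (by omega)]
                  unfold isValidRegexSpecAt
                  rw [hdrop, hdrop2, hprev2, h5]
                  have : isValidRegexTokB ('\\' :: cs[i + 1] :: cs.drop (i + 2)) false
                      = (isValidRegexTokB (cs.drop (i + 2)) false).map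
                          (fun ts => (cs[i + 1], true) :: ts) := by
                    simp [isValidRegexTokB]
                  rw [this, isValidRegexMatchMap]
                  cases isValidRegexTokB (cs.drop (i + 2)) false <;> simp [isValidRegexScanB]
              · rw [if_neg h5]
                by_cases h7 : cs[i] = '*' ∨ cs[i] = '+' ∨ cs[i] = '?'
                · rw [if_pos h7]
                  by_cases h0 : i = 0
                  · rw [dif_pos h0]
                    subst h0
                    unfold isValidRegexSpecAt
                    rw [hdrop, isValidRegexTokB_cons _ h5, isValidRegexMatchMap]
                    cases isValidRegexTokB (cs.drop (0 + 1)) false with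
                    | none => rfl
                    | some val =>
                      rcases h7 with h7 | h7 | h7 <;>
                        simp [isValidRegexScanB, isValidRegexPrevOf, h7]
                  · rw [dif_neg h0]
                    obtain ⟨j, rfl⟩ : ∃ j, i = j + 1 := ⟨i - 1, by omega⟩
                    have hj : j < cs.length := by omega
                    have hpv : isValidRegexPrevOf cs (j + 1) = some cs[j] := by
                      simp [isValidRegexPrevOf, List.getElem?_eq_getElem hj]
                    have hidx : cs[j + 1 - 1]'(by omega) = cs[j] := by simp
                    by_cases hq : cs[j + 1 - 1]'(by omega) = '*' ∨ cs[j + 1 - 1]'(by omega) = '+' ∨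
                        cs[j + 1 - 1]'(by omega) = '?'
                    · rw [if_pos hq]
                      unfold isValidRegexSpecAt
                      rw [hdrop, isValidRegexTokB_cons _ h5, isValidRegexMatchMap, hpv]
                      rw [hidx] at hq
                      cases isValidRegexTokB (cs.drop (j + 1 + 1)) false with
                      | none => rfl
                      | some val =>
                        rcases h7 with h7 | h7 | h7 <;> rcases hq with hq | hq | hq <;>
                          simp [isValidRegexScanB, h7, hq]
                    · rw [if_neg hq,
                        IH (cs.length - (j + 1 + 1)) (by omega) (j + 1 + 1) stack rfl (by omega)]
                      unfold isValidRegexSpecAt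
                      rw [hdrop, isValidRegexTokB_cons _ h5, isValidRegexMatchMap, hpv, hprev]
                      rw [hidx] at hq
                      cases isValidRegexTokB (cs.drop (j + 1 + 1)) false with
                      | none => rfl
                      | some val =>
                        rcases h7 with h7 | h7 | h7 <;>
                          simp [isValidRegexScanB, h7, hq]
                · rw [if_neg h7,
                    IH (cs.length - (i + 1)) (by omega) (i + 1) stack rfl (by omega)]
                  unfold isValidRegexSpecAt
                  rw [hdrop, hprev, isValidRegexTokB_cons _ h5, isValidRegexMatchMap]
                  simp only [not_or] at h7
                  cases isValidRegexTokB (cs.drop (i + 1)) false <;>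
                    simp [isValidRegexScanB, h1, h2, h3, h4, h7.1, h7.2.1, h7.2.2]
    · rw [dif_neg hlt]
      have hi : i = cs.length := by omega
      unfold isValidRegexSpecAt
      rw [hi, List.drop_length]
      cases hcs : isValidRegexPrevOf cs cs.length <;> simp [isValidRegexTokB, isValidRegexScanB]

theorem isValidRegex_eq (pattern : String) : is_valid_regex pattern = is_valid_regex_alt pattern := by
  have := isValidRegexLoopA_eq pattern.toList pattern.toList.length 0 [] rfl (Nat.zero_le _)
  simpa [is_valid_regex, is_valid_regex_alt, isValidRegexSpecAt, isValidRegexPrevOf] using this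

-- ===== VERDICT (by name: the statement is the Claim_ definition above) =====
theorem is_valid_regex_spec : Claim_equal_is_valid_regex := by
  intro pattern _
  unfold Spec_is_valid_regex
  exact isValidRegex_eq pattern
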